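-- pv_equiv track=rewrite | github.com/Kaligo812/IP | guias/guia7/guia7.py | quitar_letra
-- ===== SOURCE A (Python) =====
-- def quitar_letra(palabra: str, letra: str, todas: bool = False) -> str:
--     palabra_final: str = ""
--
--     for i in range(len(palabra)):
--         if (palabra[i] == letra and not todas):
--             i += 1
--             while (i < len(palabra)):
--                 palabra_final += palabra[i]
--                 i += 1
--
--             break
--
--         if (palabra[i] != letra):
--             palabra_final += palabra[i]
--
--     return palabra_final
-- ===== SOURCE B (Python) =====
-- def quitar_letra(palabra: str, letra: str, todas: bool = False) -> str:
--     if todas: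
--         return "".join(c for c in palabra if c != letra)
--     if len(letra) == 1 and letra in palabra:
--         i = palabra.index(letra)
--         return palabra[:i] + palabra[i + 1:]
--     return palabra
-- ===== Notes on version B (the rewrite author's own statement) =====
-- stated objective: simpler
-- what changed: B splits on the mode: todas=True is a single filter/join, todas=False finds the first match with str.index and splices the string via slicing, instead of A's char-by-char accumulation with a break-and-tail-copy loop.
import Mathlib
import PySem

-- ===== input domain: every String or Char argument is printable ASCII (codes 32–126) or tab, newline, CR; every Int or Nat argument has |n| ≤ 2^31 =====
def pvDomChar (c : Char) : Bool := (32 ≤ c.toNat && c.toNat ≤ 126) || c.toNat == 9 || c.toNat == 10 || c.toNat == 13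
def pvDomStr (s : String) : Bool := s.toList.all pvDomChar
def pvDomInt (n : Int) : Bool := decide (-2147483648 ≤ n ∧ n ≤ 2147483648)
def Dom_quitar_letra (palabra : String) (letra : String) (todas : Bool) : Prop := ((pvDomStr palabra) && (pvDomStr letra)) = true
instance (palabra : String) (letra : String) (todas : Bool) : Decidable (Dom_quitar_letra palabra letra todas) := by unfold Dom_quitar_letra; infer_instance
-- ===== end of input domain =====

-- B replaces A's char-by-char accumulator (with a break-and-tail-copy loop) by
-- mode split: a filter for todas=True, and index+slice splicing for todas=False. Objective: simpler.

-- ===== PORT A =====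
-- A's for-loop over the characters, in order: on the first char equal to `letra`
-- (as a string) with todas=False, the rest of the word is copied and the loop breaks;
-- chars different from `letra` are appended; a matching char with todas=True is skipped.
def quitar_letra_goA (letra : String) (todas : Bool) : List Char → List Char
  | [] => []
  | c :: rest =>
    if String.ofList [c] = letra ∧ todas = false then rest
    else if String.ofList [c] ≠ letra then c :: quitar_letra_goA letra todas rest
    else quitar_letra_goA letra todas rest

def quitar_letra (palabra : String) (letra : String) (todas : Bool) : String :=
  String.ofList (quitar_letra_goA letra todas palabra.toList)

-- ===== PORT B =====
-- B: todas=True → filter; todas=False → if letra is one char occurring in palabra,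
-- splice out its first occurrence (index + slices), else return palabra unchanged.
def quitar_letra_alt (palabra : String) (letra : String) (todas : Bool) : String :=
  if todas then
    String.ofList (palabra.toList.filter (fun c => String.ofList [c] ≠ letra))
  else
    match letra.toList with
    | [l0] =>
      if l0 ∈ palabra.toList then
        let i := palabra.toList.idxOf l0
        String.ofList (palabra.toList.take i ++ palabra.toList.drop (i + 1))
      else palabra
    | _ => palabra

-- ===== PRECONDITION & SPEC =====
def Spec_quitar_letra (palabra : String) (letra : String) (todas : Bool) (out : String) : Prop := out = quitar_letra_alt palabra letra todas
instance (palabra : String) (letra : String) (todas : Bool) (out : String) : Decidable (Spec_quitar_letra palabra letra todas out) := by unfold Spec_quitar_letra; infer_instance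

-- ===== CLAIM (what is proved, stated in full; the proofs are below) =====
def Claim_equal_quitar_letra : Prop := ∀ (palabra : String) (letra : String) (todas : Bool), Dom_quitar_letra palabra letra todas → Spec_quitar_letra palabra letra todas (quitar_letra palabra letra todas)

-- ===== LEMMAS AND PROOFS =====

theorem mk_singleton_eq_iff (c : Char) (letra : String) :
    String.ofList [c] = letra ↔ letra.toList = [c] := by
  constructor
  · intro h; rw [← h]; simp
  · intro h; rw [← h]; simp

theorem goA_todas_true (letra : String) (l : List Char) :
    quitar_letra_goA letra true l = l.filter (fun c => String.ofList [c] ≠ letra) := by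
  induction l with
  | nil => rfl
  | cons c rest ih =>
    by_cases h : String.ofList [c] = letra
    · simp [quitar_letra_goA, h, ih, List.filter]
    · simp [quitar_letra_goA, h, ih, List.filter]

theorem goA_no_match (letra : String) (l : List Char)
    (h : ∀ c ∈ l, String.ofList [c] ≠ letra) :
    quitar_letra_goA letra false l = l := by
  induction l with
  | nil => rfl
  | cons c rest ih =>
    have hc : String.ofList [c] ≠ letra := h c (by simp)
    simp [quitar_letra_goA, hc, ih (fun x hx => h x (by simp [hx]))]

theorem goA_splice (letra : String) (l0 : Char) (hl : letra.toList = [l0])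
    (l : List Char) (hm : l0 ∈ l) :
    quitar_letra_goA letra false l =
      l.take (l.idxOf l0) ++ l.drop (l.idxOf l0 + 1) := by
  induction l with
  | nil => cases hm
  | cons c rest ih =>
    by_cases h : c = l0
    · subst h
      have : String.ofList [c] = letra := (mk_singleton_eq_iff c letra).mpr hl
      simp [quitar_letra_goA, this]
    · have hne : String.ofList [c] ≠ letra := by
        intro he
        have h2 : [l0] = [c] := hl ▸ (mk_singleton_eq_iff c letra).mp he
        exact h (List.singleton_inj.mp h2).symm
      have hm' : l0 ∈ rest := by
        rcases List.mem_cons.mp hm with h' | h'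
        · exact absurd h'.symm h
        · exact h'
      have : (c :: rest).idxOf l0 = rest.idxOf l0 + 1 := by
        simp [h]
      simp [quitar_letra_goA, hne, ih hm', this, List.take_succ_cons, List.drop_succ_cons]

-- ===== VERDICT (by name: the statement is the Claim_ definition above) =====
theorem quitar_letra_spec : Claim_equal_quitar_letra := by
  intro palabra letra todas _
  unfold Spec_quitar_letra quitar_letra quitar_letra_alt
  cases todas with
  | true => simp [goA_todas_true]
  | false =>
    simp only [if_neg (by simp : ¬ (false = true))]
    match hl : letra.toList with
    | [l0] =>
      by_cases hm : l0 ∈ palabra.toList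
      · simp only [hm, if_pos]
        rw [goA_splice letra l0 hl palabra.toList hm]
      · simp only [hm, if_neg, not_false_iff]
        rw [goA_no_match letra palabra.toList (fun c hc he =>
          hm (by simpa [← List.singleton_inj.mp (hl ▸ (mk_singleton_eq_iff c letra).mp he)] using hc))]
        simp
    | [] =>
      rw [goA_no_match letra palabra.toList (fun c _ he => by
        have := (mk_singleton_eq_iff c letra).mp he
        simp [hl] at this)]
      simp
    | (a :: b :: t) =>
      rw [goA_no_match letra palabra.toList (fun c _ he => by
        have := (mk_singleton_eq_iff c letra).mp he
        simp [hl] at this)]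
      simp
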